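-- pv_equiv track=rewrite | github.com/alexvornsand/advent-of-code-2021 | solutions/day-25/day-25.py | findLandingSpace
-- ===== SOURCE A (Python) =====
-- import copy
--
-- def findLandingSpace(cucumberGrid):
--     cucumberDict = {}
--     blankDict = {}
--     for r in range(len(cucumberGrid)):
--         for c in range(len(cucumberGrid[r])):
--             cucumberDict[(r, c)] = cucumberGrid[r][c]
--             blankDict[(r, c)] = '.'
--     i = 1
--     while(True):
--         nextDict = copy.deepcopy(blankDict)
--         for r in range(len(cucumberGrid)):
--             for c in range(len(cucumberGrid[r])):
--                 if cucumberDict[(r, c)] == '>':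
--                     if c + 1 == len(cucumberGrid[0]):
--                         nextC = 0
--                     else:
--                         nextC = c + 1
--                     if cucumberDict[(r, nextC)] == '.':
--                         nextDict[(r, nextC)] = '>'
--                     else:
--                         nextDict[(r, c)] = '>'
--                 elif cucumberDict[(r, c)] == 'v':
--                     nextDict[(r, c)] = 'v'
--         stage2Dict = copy.deepcopy(nextDict)
--         nextDict = copy.deepcopy(blankDict)
--         for r in range(len(cucumberGrid)):
--             for c in range(len(cucumberGrid[r])):
--                 if stage2Dict[(r, c)] == 'v':
--                     if r + 1 == len(cucumberGrid):
--                         nextR = 0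
--                     else:
--                         nextR = r + 1
--                     if stage2Dict[(nextR, c)] == '.':
--                         nextDict[(nextR, c)] = 'v'
--                     else:
--                         nextDict[(r, c)] = 'v'
--                 elif stage2Dict[(r, c)] == '>':
--                     nextDict[(r, c)] = '>'
--         if nextDict == cucumberDict:
--             break
--         else:
--             cucumberDict = copy.deepcopy(nextDict)
--             i += 1
--     return(i)
-- ===== SOURCE B (Python) =====
-- def findLandingSpace(cucumberGrid):
--     def slide(row, ch):
--         wrapped = row.endswith(ch) and row.startswith('.')
--         out = []
--         i = 0
--         n = len(row)
--         while i < n: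
--             if row[i] == ch and i + 1 < n and row[i + 1] == '.':
--                 out.append('.')
--                 out.append(ch)
--                 i += 2
--             else:
--                 out.append(row[i])
--                 i += 1
--         if wrapped:
--             out[0] = ch
--             out[-1] = '.'
--         return ''.join(out)
--
--     def clean(row):
--         return ''.join(c if c in '>v' else '.' for c in row)
--
--     grid = list(cucumberGrid)
--     steps = 1
--     while True:
--         rows = [clean(slide(row, '>')) for row in grid]
--         width = len(rows[0]) if rows else 0
--         cols = [slide(''.join(row[c] for row in rows), 'v') for c in range(width)]
--         new = [''.join(cols[c][r] for c in range(width)) for r in range(len(rows))]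
--         if new == grid:
--             return steps
--         grid = new
--         steps += 1
-- ===== Notes on version B (the rewrite author's own statement) =====
-- stated objective: alternative
-- what changed: B replaces A's per-cell (r,c)-keyed dicts (rebuilt with copy.deepcopy, destination writes per cell) by pair-rewriting passes over the grid itself: each row is slid east by one scan that rewrites '>.' pairs to '.>' with an explicit first/last wrap fix, non-cucumber cells are normalised to '.', and the south herd is handled by running the identical slide over the extracted columns; the fixpoint comparison is on whole grids instead of dicts.
-- outside the precondition, e.g. on findLandingSpace(['ab', 'c']): A returns 2, B raises IndexError; on findLandingSpace(['', 'a']): A returns 2, B returns 2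
import Mathlib
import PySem

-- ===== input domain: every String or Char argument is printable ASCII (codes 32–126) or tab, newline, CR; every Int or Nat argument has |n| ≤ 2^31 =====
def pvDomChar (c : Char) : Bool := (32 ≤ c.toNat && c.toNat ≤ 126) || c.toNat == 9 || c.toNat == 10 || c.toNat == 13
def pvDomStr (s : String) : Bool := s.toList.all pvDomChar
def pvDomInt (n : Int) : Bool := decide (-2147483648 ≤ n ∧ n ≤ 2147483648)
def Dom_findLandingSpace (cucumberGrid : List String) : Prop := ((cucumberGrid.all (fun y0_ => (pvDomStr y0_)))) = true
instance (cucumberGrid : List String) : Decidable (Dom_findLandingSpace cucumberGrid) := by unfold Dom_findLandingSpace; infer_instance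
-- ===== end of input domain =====

-- B rebuilds each row (then each column) by one pair-rewriting scan instead of A's per-cell dict of
-- destination writes rebuilt with deepcopy; return-value equivalence is proved on every rectangular
-- grid (both loop ports run on the same fuel, so agreement needs no termination argument).

-- ===== PORT A =====
-- A's 'while True' has no bound; the ports carry fuel for totality only. Both ports use the same
-- fuel; on any input whose run terminates within it the fueled loop returns the Python value
-- (3^cells + 2 dominates every terminating run: a terminating deterministic run never repeats a
-- state, and there are at most 3^cells reachable states after the first step).
def pvFuel (g : List String) : Nat := 3 ^ (g.foldl (fun a s => a + s.toList.length) 0) + 2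

-- len(cucumberGrid[r]) and cucumberGrid[r][c] (all keys looked up below exist on rectangular input)
def pvRowLen (g : List String) (r : Int) : Int := PySem.Str.len (PySem.List.pyGetD g r "")
def pvRow (g : List String) (r : Int) : List Char := (PySem.List.pyGetD g r "").toList
def pvCellC (g : List String) (r c : Int) : Char := PySem.List.pyGetD (pvRow g r) c ' '

-- Python fills cucumberDict and blankDict in one loop nest; the identical nest runs once per
-- value function here (same keys in the same row-major insertion order, same values).
def pvBuild (g : List String) (f : Int → Int → Char) : PySem.Dict (Int × Int) Char :=
  (PySem.List.pyRange 0 g.length 1).foldl (fun d r =>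
    (PySem.List.pyRange 0 (pvRowLen g r) 1).foldl (fun d c =>
      d.insert (r, c) (f r c)) d) PySem.Dict.empty

-- first herd loop of one iteration ('>' moves east)
def pvEast (g : List String) (d : PySem.Dict (Int × Int) Char) : PySem.Dict (Int × Int) Char :=
  (PySem.List.pyRange 0 g.length 1).foldl (fun nd r =>
    (PySem.List.pyRange 0 (pvRowLen g r) 1).foldl (fun nd c =>
      if d.getD (r, c) ' ' = '>' then
        let nextC : Int := if c + 1 = pvRowLen g 0 then 0 else c + 1
        if d.getD (r, nextC) ' ' = '.' then nd.insert (r, nextC) '>' else nd.insert (r, c) '>'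
      else if d.getD (r, c) ' ' = 'v' then nd.insert (r, c) 'v'
      else nd) nd) (pvBuild g (fun _ _ => '.'))

-- second herd loop ('v' moves south, reading the stage-2 dict)
def pvSouth (g : List String) (s2 : PySem.Dict (Int × Int) Char) : PySem.Dict (Int × Int) Char :=
  (PySem.List.pyRange 0 g.length 1).foldl (fun nd r =>
    (PySem.List.pyRange 0 (pvRowLen g r) 1).foldl (fun nd c =>
      if s2.getD (r, c) ' ' = 'v' then
        let nextR : Int := if r + 1 = (g.length : Int) then 0 else r + 1
        if s2.getD (nextR, c) ' ' = '.' then nd.insert (nextR, c) 'v' else nd.insert (r, c) 'v'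
      else if s2.getD (r, c) ' ' = '>' then nd.insert (r, c) '>'
      else nd) nd) (pvBuild g (fun _ _ => '.'))

-- the while loop; every dict built keeps the fixed row-major key order, so Lean's ordered Dict
-- equality here coincides with Python's order-insensitive dict ==
def pvALoop (g : List String) : Nat → PySem.Dict (Int × Int) Char → Int → Int
  | 0, _, i => i
  | fuel+1, d, i =>
    let nd := pvSouth g (pvEast g d)
    if nd = d then i else pvALoop g fuel nd (i + 1)

def findLandingSpace (cucumberGrid : List String) : Int :=
  pvALoop cucumberGrid (pvFuel cucumberGrid)
    (pvBuild cucumberGrid (fun r c => pvCellC cucumberGrid r c)) 1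

-- ===== PORT B =====
-- the while-i loop of Source B's slide: consume a '<ch>.' pair (the cucumber steps right) or one char
def pvScan (ch : Char) : List Char → List Char
  | [] => []
  | [x] => [x]
  | x :: y :: t => if x = ch ∧ y = '.' then '.' :: ch :: pvScan ch t else x :: pvScan ch (y :: t)

-- slide(row, ch) of Source B; out[0]=ch / out[-1]='.' become List.set (wrapped forces length ≥ 2)
def pvSlide (ch : Char) (row : List Char) : List Char :=
  let wrapped := row.getLast? == some ch && row.head? == some '.'
  let out := pvScan ch row
  if wrapped then (out.set 0 ch).set (out.length - 1) '.' else out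

-- clean(row) of Source B
def pvClean (row : List Char) : List Char :=
  row.map (fun c => if c = '>' || c = 'v' then c else '.')

-- one body of Source B's while loop (east rows, then south on the extracted columns)
def pvStepB (grid : List (List Char)) : List (List Char) :=
  let rows := grid.map (fun row => pvClean (pvSlide '>' row))
  let width := (rows.headD []).length
  let cols := (List.range width).map (fun c => pvSlide 'v' (rows.map (fun row => row.getD c ' ')))
  (List.range rows.length).map (fun r => (List.range width).map (fun c => (cols.getD c []).getD r ' '))

def pvBLoop : Nat → List (List Char) → Int → Int
  | 0, _, steps => steps
  | fuel+1, grid, steps =>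
    let new := pvStepB grid
    if new = grid then steps else pvBLoop fuel new (steps + 1)

def findLandingSpace_alt (cucumberGrid : List String) : Int :=
  pvBLoop (pvFuel cucumberGrid) (cucumberGrid.map (·.toList)) 1

-- ===== PRECONDITION & SPEC =====
def pvRect (g : List String) : Bool := g.all (fun s => s.toList.length == (g.headD "").toList.length)

-- Pre_ keeps exactly the rectangular grids: A wraps every row at len(cucumberGrid[0]), so on a
-- ragged grid it looks up dict keys that were never created and raises KeyError (it happens to
-- return on ragged grids whose cucumbers never touch the ragged edge — those stay outside, B's
-- column extraction needs one width); rectangular inputs on which the shared while-loop never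
-- reaches stasis make Python A (and B) loop forever, and stay inside: the ports are proved equal
-- on all of Pre_.
def Pre_findLandingSpace (cucumberGrid : List String) : Prop := pvRect cucumberGrid = true
instance (cucumberGrid : List String) : Decidable (Pre_findLandingSpace cucumberGrid) := by
  unfold Pre_findLandingSpace; infer_instance

def pvWitness_findLandingSpace : List String := [">v", "v>"]

def Spec_findLandingSpace (cucumberGrid : List String) (out : Int) : Prop := out = findLandingSpace_alt cucumberGrid
instance (cucumberGrid : List String) (out : Int) : Decidable (Spec_findLandingSpace cucumberGrid out) := by unfold Spec_findLandingSpace; infer_instance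

-- ===== CLAIM (what is proved, stated in full; the proofs are below) =====
def Claim_equal_findLandingSpace : Prop := ∀ (cucumberGrid : List String), Dom_findLandingSpace cucumberGrid → Pre_findLandingSpace cucumberGrid → Spec_findLandingSpace cucumberGrid (findLandingSpace cucumberGrid)

-- ===== LEMMAS AND PROOFS =====

-- ---------- key-list machinery for port A's dicts ----------
def pvCellsL (g : List String) : List (Int × Int) :=
  (PySem.List.pyRange 0 g.length 1).flatMap (fun r =>
    (PySem.List.pyRange 0 (pvRowLen g r) 1).map (fun c => (r, c)))

theorem pvRowLen_eq (g : List String) (r : Int) : pvRowLen g r = ((pvRow g r).length : Int) := by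
  simp [pvRowLen, pvRow]

theorem mem_pvCellsL (g : List String) (rc : Int × Int) :
    rc ∈ pvCellsL g ↔ 0 ≤ rc.1 ∧ rc.1 < (g.length : Int) ∧ 0 ≤ rc.2 ∧ rc.2 < ((pvRow g rc.1).length : Int) := by
  obtain ⟨r, c⟩ := rc
  rw [pvCellsL]
  simp only [List.mem_flatMap, List.mem_map, PySem.List.mem_pyRange_one, pvRowLen_eq, Prod.mk.injEq]
  constructor
  · rintro ⟨a, ⟨h1, h2⟩, c', ⟨h3, h4⟩, rfl, rfl⟩; exact ⟨h1, h2, h3, h4⟩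
  · rintro ⟨h1, h2, h3, h4⟩; exact ⟨r, ⟨h1, h2⟩, c, ⟨h3, h4⟩, rfl, rfl⟩

theorem nodup_pvCellsL (g : List String) : (pvCellsL g).Nodup := by
  rw [pvCellsL, List.nodup_flatMap]
  refine ⟨fun r _ => List.Nodup.map (fun a b h => by simpa using h)
      (PySem.List.nodup_pyRange_one 0 (pvRowLen g r)), ?_⟩
  refine List.Pairwise.imp ?_ (PySem.List.nodup_pyRange_one 0 (g.length : Int))
  intro a b hab x hxa hxb
  simp only [List.mem_map] at hxa hxb
  obtain ⟨c1, _, rfl⟩ := hxa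
  obtain ⟨c2, _, h⟩ := hxb
  exact hab (congrArg Prod.fst h).symm

theorem pvBuild_eq_foldl (g : List String) (f : Int → Int → Char) :
    pvBuild g f = (pvCellsL g).foldl (fun d rc => d.insert rc (f rc.1 rc.2)) PySem.Dict.empty := by
  rw [pvCellsL, List.foldl_flatMap]
  unfold pvBuild
  congr 1; funext d r
  rw [List.foldl_map]

theorem items_pvBuild (g : List String) (f : Int → Int → Char) :
    (pvBuild g f).items = (pvCellsL g).map (fun rc => (rc, f rc.1 rc.2)) := by
  rw [pvBuild_eq_foldl]
  have h := PySem.Dict.items_foldl_insert_fresh (pvCellsL g) (fun rc => rc)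
    (fun rc => f rc.1 rc.2) (PySem.Dict.empty (κ := Int × Int) (ν := Char))
    (fun a _ => PySem.Dict.contains_empty a) (by simpa using nodup_pvCellsL g)
  simpa using h

theorem keys_pvBuild (g : List String) (f : Int → Int → Char) :
    (pvBuild g f).keys = pvCellsL g := by
  simp [PySem.Dict.keys, items_pvBuild, List.map_map, Function.comp_def]

theorem getD_pvBuild (g : List String) (f : Int → Int → Char) {rc : Int × Int}
    (h : rc ∈ pvCellsL g) (d0 : Char) : (pvBuild g f).getD rc d0 = f rc.1 rc.2 := by
  refine PySem.Dict.getD_of_mem_items (pvBuild g f) ?_ ?_ d0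
  · rw [items_pvBuild]; exact List.mem_map.2 ⟨rc, h, rfl⟩
  · rw [keys_pvBuild]; exact nodup_pvCellsL g

theorem pvBuild_eq_iff (g : List String) (f f' : Int → Int → Char) :
    pvBuild g f = pvBuild g f' ↔ ∀ rc ∈ pvCellsL g, f rc.1 rc.2 = f' rc.1 rc.2 := by
  rw [PySem.Dict.ext_iff, items_pvBuild, items_pvBuild, List.map_eq_map_iff]
  constructor
  · intro h rc hrc; simpa using (h rc hrc)
  · intro h rc hrc; simp [h rc hrc]

-- A's loop nests, flattened to one pass over the cell list
theorem pvEast_eq_foldl (g : List String) (d : PySem.Dict (Int × Int) Char) :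
    pvEast g d = (pvCellsL g).foldl (fun nd rc =>
      if d.getD (rc.1, rc.2) ' ' = '>' then
        let nextC : Int := if rc.2 + 1 = pvRowLen g 0 then 0 else rc.2 + 1
        if d.getD (rc.1, nextC) ' ' = '.' then nd.insert (rc.1, nextC) '>' else nd.insert (rc.1, rc.2) '>'
      else if d.getD (rc.1, rc.2) ' ' = 'v' then nd.insert (rc.1, rc.2) 'v'
      else nd) (pvBuild g (fun _ _ => '.')) := by
  rw [pvCellsL, List.foldl_flatMap]
  unfold pvEast
  congr 1; funext nd r
  rw [List.foldl_map]

theorem pvSouth_eq_foldl (g : List String) (s2 : PySem.Dict (Int × Int) Char) :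
    pvSouth g s2 = (pvCellsL g).foldl (fun nd rc =>
      if s2.getD (rc.1, rc.2) ' ' = 'v' then
        let nextR : Int := if rc.1 + 1 = (g.length : Int) then 0 else rc.1 + 1
        if s2.getD (nextR, rc.2) ' ' = '.' then nd.insert (nextR, rc.2) 'v' else nd.insert (rc.1, rc.2) 'v'
      else if s2.getD (rc.1, rc.2) ' ' = '>' then nd.insert (rc.1, rc.2) '>'
      else nd) (pvBuild g (fun _ _ => '.')) := by
  rw [pvCellsL, List.foldl_flatMap]
  unfold pvSouth
  congr 1; funext nd r
  rw [List.foldl_map]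

theorem mem_pvCellsL' (g : List String) (r c : Int) :
    (r, c) ∈ pvCellsL g ↔ 0 ≤ r ∧ r < (g.length : Int) ∧ 0 ≤ c ∧ c < ((pvRow g r).length : Int) :=
  mem_pvCellsL g (r, c)

theorem pvRow_eq_getD (g : List String) {r : Int} (h0 : 0 ≤ r) :
    pvRow g r = (g.getD r.toNat "").toList := by
  rw [pvRow, show r = ((r.toNat : Nat) : Int) by omega, PySem.List.pyGetD_natCast]
  simp only [Int.toNat_natCast]

theorem pvScan_length (ch : Char) (l : List Char) : (pvScan ch l).length = l.length := by
  induction l using pvScan.induct ch with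
  | case1 => rfl
  | case2 x => rfl
  | case3 x y t hm ih => simp [pvScan, hm, ih]
  | case4 x y t hm ih => simp [pvScan, hm, ih]

def pvScanCell (ch : Char) (l : List Char) (j : Nat) : Char :=
  if l.getD j ' ' = ch ∧ j + 1 < l.length ∧ l.getD (j+1) ' ' = '.' then '.'
  else if l.getD j ' ' = '.' ∧ 0 < j ∧ l.getD (j-1) ' ' = ch then ch
  else l.getD j ' '

theorem pvScan_getD (ch : Char) (hch : ch ≠ '.') (l : List Char) :
    ∀ j, j < l.length → (pvScan ch l).getD j ' ' = pvScanCell ch l j := by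
  induction l using pvScan.induct ch with
  | case1 => intro j hj; simp at hj
  | case2 x =>
    intro j hj
    have : j = 0 := by simpa using hj
    subst this
    simp [pvScan, pvScanCell]
  | case3 x y t hm ih =>
    obtain ⟨rfl, rfl⟩ := hm
    have hscan : pvScan x (x :: '.' :: t) = '.' :: x :: pvScan x t := by simp [pvScan]
    intro j hj
    rw [hscan]
    match j with
    | 0 => simp [pvScanCell]
    | 1 => simp [pvScanCell, Ne.symm hch]
    | (k+2) =>
      have hk : k < t.length := by simpa using hj
      simp only [List.getD_cons_succ]
      rw [ih k hk]
      match k with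
      | 0 =>
        have e1 : 2 ≤ t.length ↔ 1 < t.length := by omega
        simp [pvScanCell, Ne.symm hch, e1]
      | (k'+1) =>
        have e1 : k' + 1 + 2 ≤ t.length ↔ k' + 1 + 1 < t.length := by omega
        simp [pvScanCell, e1, show k' + 1 + 1 = k' + 2 from rfl]
  | case4 x y t hm ih =>
    have hscan : pvScan ch (x :: y :: t) = x :: pvScan ch (y :: t) := by simp [pvScan, hm]
    intro j hj
    rw [hscan]
    match j with
    | 0 =>
      simp only [List.getD_cons_zero, pvScanCell]
      by_cases hx : x = ch
      · have hy : y ≠ '.' := fun h => hm ⟨hx, h⟩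
        simp [hx, hy]
      · simp [hx]
    | (k+1) =>
      have hk : k < (y :: t).length := by simpa using hj
      simp only [List.getD_cons_succ]
      rw [ih k hk]
      match k with
      | 0 =>
        simp only [pvScanCell, List.getD_cons_zero, List.getD_cons_succ, List.length_cons]
        by_cases hy : y = '.'
        · have hx : x ≠ ch := fun h => hm ⟨h, hy⟩
          simp [hy, hx, Ne.symm hch]
        · simp [hy]
      | (k'+1) => simp [pvScanCell]

def pvNxt (n j : Nat) : Nat := if j + 1 = n then 0 else j + 1
def pvPrv (n j : Nat) : Nat := if j = 0 then n - 1 else j - 1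

def pvSlideCell (ch : Char) (l : List Char) (j : Nat) : Char :=
  if l.getD j ' ' = ch ∧ l.getD (pvNxt l.length j) ' ' = '.' then '.'
  else if l.getD j ' ' = '.' ∧ l.getD (pvPrv l.length j) ' ' = ch then ch
  else l.getD j ' '

theorem pvSlide_length (ch : Char) (l : List Char) : (pvSlide ch l).length = l.length := by
  by_cases hw : (l.getLast? == some ch && l.head? == some '.') = true
  · simp [pvSlide, hw, pvScan_length]
  · simp [pvSlide, hw, pvScan_length]

theorem getLast?_eq_getD {l : List Char} (h : l ≠ []) :
    l.getLast? = some (l.getD (l.length - 1) ' ') := by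
  have hlen : 0 < l.length := List.length_pos_iff.mpr h
  rw [List.getLast?_eq_getElem?, List.getD_eq_getElem?_getD, List.getElem?_eq_getElem (by omega)]
  rfl

theorem head?_eq_getD {l : List Char} (h : l ≠ []) :
    l.head? = some (l.getD 0 ' ') := by
  have hlen : 0 < l.length := List.length_pos_iff.mpr h
  rw [List.head?_eq_getElem?, List.getD_eq_getElem?_getD, List.getElem?_eq_getElem (by omega)]
  rfl

theorem pvSlide_getD (ch : Char) (hch : ch ≠ '.') (l : List Char) (j : Nat) (hj : j < l.length) :
    (pvSlide ch l).getD j ' ' = pvSlideCell ch l j := by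
  have hne : l ≠ [] := by intro h; subst h; simp at hj
  have hlen : 0 < l.length := List.length_pos_iff.mpr hne
  have hslen : (pvScan ch l).length = l.length := pvScan_length ch l
  simp only [pvSlide, getLast?_eq_getD hne, head?_eq_getD hne]
  by_cases hw : (l.getD (l.length - 1) ' ' = ch ∧ l.getD 0 ' ' = '.')
  · -- wrapped
    have hn2 : 2 ≤ l.length := by
      by_contra h
      have h2 := hw.1
      rw [show l.length - 1 = 0 from by omega, hw.2] at h2
      exact hch h2.symm
    have hwb : (some (l.getD (l.length - 1) ' ') == some ch && some (l.getD 0 ' ') == some '.') = true := by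
      rw [hw.1, hw.2]; simp
    rw [if_pos hwb]
    rw [List.getD_eq_getElem _ _ (by simp [hslen]; omega)]
    simp only [hslen]
    rw [List.getElem_set, List.getElem_set]
    rcases eq_or_ne j (l.length - 1) with rfl | hjlast
    · rw [if_pos rfl]
      unfold pvSlideCell pvNxt
      rw [if_pos ⟨hw.1, by rw [show l.length - 1 + 1 = l.length from by omega, if_pos rfl]; exact hw.2⟩]
    · rw [if_neg (Ne.symm hjlast)]
      rcases eq_or_ne j 0 with rfl | hj0
      · rw [if_pos rfl]
        unfold pvSlideCell pvPrv pvNxt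
        rw [if_neg (by rw [hw.2]; exact fun h => hch h.1.symm)]
        rw [if_pos ⟨hw.2, by rw [if_pos rfl]; exact hw.1⟩]
      · rw [if_neg (Ne.symm hj0)]
        rw [← List.getD_eq_getElem _ ' ' (by omega), pvScan_getD ch hch l j (by omega)]
        unfold pvScanCell pvSlideCell pvNxt pvPrv
        have hjn : j + 1 < l.length := by omega
        rw [if_neg (show ¬ j + 1 = l.length from by omega), if_neg hj0]
        simp [hjn, Nat.pos_of_ne_zero hj0]
  · -- not wrapped
    have hwb : (some (l.getD (l.length - 1) ' ') == some ch && some (l.getD 0 ' ') == some '.') = false := by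
      rcases not_and_or.mp hw with h | h
      · simp only [Bool.and_eq_false_iff, beq_eq_false_iff_ne, ne_eq, Option.some.injEq]
        exact Or.inl h
      · simp only [Bool.and_eq_false_iff, beq_eq_false_iff_ne, ne_eq, Option.some.injEq]
        exact Or.inr h
    rw [hwb]
    simp only [Bool.false_eq_true, if_false]
    rw [pvScan_getD ch hch l j hj]
    unfold pvScanCell pvSlideCell pvNxt pvPrv
    rcases eq_or_ne (j + 1) l.length with hE | hNE
    · -- j is the last index
      rw [if_pos hE]
      rw [if_neg (show ¬ (l.getD j ' ' = ch ∧ j + 1 < l.length ∧ l.getD (j+1) ' ' = '.') from by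
        intro h; omega)]
      rw [if_neg (show ¬ (l.getD j ' ' = ch ∧ l.getD 0 ' ' = '.') from by
        intro h; exact hw ⟨by rw [show l.length - 1 = j from by omega]; exact h.1, h.2⟩)]
      rcases eq_or_ne j 0 with rfl | hj0
      · rw [if_pos rfl]
        rw [if_neg (show ¬ (l.getD 0 ' ' = '.' ∧ 0 < 0 ∧ l.getD (0-1) ' ' = ch) from by
          rintro ⟨-, h, -⟩; omega)]
        rw [if_neg (show ¬ (l.getD 0 ' ' = '.' ∧ l.getD (l.length - 1) ' ' = ch) from by
          rintro ⟨h1, h2⟩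
          rw [show l.length - 1 = 0 from by omega, h1] at h2
          exact hch h2.symm)]
      · rw [if_neg hj0]
        by_cases hc2 : (l.getD j ' ' = '.' ∧ l.getD (j-1) ' ' = ch)
        · rw [if_pos ⟨hc2.1, Nat.pos_of_ne_zero hj0, hc2.2⟩, if_pos hc2]
        · rw [if_neg (fun h => hc2 ⟨h.1, h.2.2⟩), if_neg hc2]
    · -- j + 1 < l.length
      have hjn : j + 1 < l.length := by omega
      rw [if_neg hNE]
      rcases eq_or_ne j 0 with rfl | hj0
      · rw [if_pos rfl]
        rw [if_neg (show ¬ (l.getD 0 ' ' = '.' ∧ l.getD (l.length - 1) ' ' = ch) from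
          fun h => hw ⟨h.2, h.1⟩)]
        rw [if_neg (show ¬ (l.getD 0 ' ' = '.' ∧ 0 < 0 ∧ l.getD (0-1) ' ' = ch) from by
          rintro ⟨-, h, -⟩; omega)]
        simp [hjn]
      · rw [if_neg hj0]
        simp [hjn, Nat.pos_of_ne_zero hj0]

-- fold of conditional inserts at computed targets: every write lands in `full` and writes the
-- final cell value G, so the item list stays a map over `full`
theorem pv_items_condInsertW (full : List (Int × Int)) (W : (Int × Int) → Option ((Int × Int) × Char))
    (G : (Int × Int) → Char) :
    ∀ (p : List (Int × Int)) (g0 : (Int × Int) → Char) (d : PySem.Dict (Int × Int) Char),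
      d.items = full.map (fun k => (k, g0 k)) →
      (∀ x ∈ p, ∀ t v, W x = some (t, v) → t ∈ full ∧ v = G t) →
      (p.foldl (fun d x => match W x with | some tv => d.insert tv.1 tv.2 | none => d) d).items
        = full.map (fun k => (k, if (p.filterMap (fun x => (W x).map Prod.fst)).contains k then G k else g0 k)) := by
  intro p
  induction p with
  | nil => intro g0 d hd _; simpa using hd
  | cons x t ih =>
    intro g0 d hd hcons
    rw [List.foldl_cons]
    rcases hWx : W x with _ | ⟨tg, v⟩
    · -- no write at x
      rw [ih g0 d hd (fun y hy => hcons y (List.mem_cons_of_mem _ hy))]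
      refine List.map_congr_left (fun k hk => ?_)
      simp only [List.filterMap_cons, hWx, Option.map_none]
    · obtain ⟨htg, rfl⟩ := hcons x (List.mem_cons_self ..) tg v hWx
      have hcont : d.contains tg = true := by
        rw [PySem.Dict.contains_eq_decide_mem_keys, decide_eq_true_iff, PySem.Dict.keys, hd,
          List.map_map]
        rw [show ((fun y : (Int × Int) × Char => y.1) ∘ fun k => (k, g0 k)) = id from rfl,
          List.map_id]
        exact htg
      have hins : (d.insert tg (G tg)).items
          = full.map (fun k => (k, if k = tg then G tg else g0 k)) := by
        rw [PySem.Dict.items_insert_of_contains d (G tg) hcont, hd, List.map_map]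
        refine List.map_congr_left (fun k hk => ?_)
        simp only [Function.comp_def]
        by_cases hkx : k = tg
        · subst hkx; simp
        · simp [hkx, beq_eq_false_iff_ne.2 hkx]
      rw [ih _ _ hins (fun y hy => hcons y (List.mem_cons_of_mem _ hy))]
      refine List.map_congr_left (fun k hk => ?_)
      simp only [List.filterMap_cons, hWx, Option.map_some]
      by_cases hkt : ((t.filterMap (fun y => (W y).map Prod.fst)).contains k) = true
      · simp only [List.contains_cons, hkt, Bool.or_true]
        by_cases hke : k = tg <;> simp [hke]
      · simp only [List.contains_cons, hkt, Bool.or_false]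
        by_cases hke : k = tg
        · subst hke; simp
        · simp [hke]

-- ---------- rectangular-grid cell geometry ----------
def pvW (g : List String) : Nat := (g.headD "").toList.length

theorem pvHeadD_eq_getD (g : List String) : g.headD "" = g.getD 0 "" := by
  cases g <;> rfl

theorem pvRect_rowlen (g : List String) (hrect : pvRect g = true) {i : Nat} (hi : i < g.length) :
    (g.getD i "").toList.length = pvW g := by
  simp only [pvRect, List.all_eq_true] at hrect
  have := hrect (g.getD i "") (by rw [List.getD_eq_getElem g "" hi]; exact List.getElem_mem _)
  simpa [pvW] using this

theorem pvRowLen_zero (g : List String) : pvRowLen g 0 = ((pvW g : Nat) : Int) := by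
  rw [pvRowLen_eq, pvRow_eq_getD g le_rfl]
  simp only [pvW, pvHeadD_eq_getD, Int.toNat_zero]

theorem mem_cells_rect (g : List String) (hrect : pvRect g = true) (r c : Int) :
    (r, c) ∈ pvCellsL g ↔ 0 ≤ r ∧ r < (g.length : Int) ∧ 0 ≤ c ∧ c < ((pvW g : Nat) : Int) := by
  rw [mem_pvCellsL']
  constructor
  · rintro ⟨h1, h2, h3, h4⟩
    rw [pvRow_eq_getD g h1, pvRect_rowlen g hrect (by omega)] at h4
    exact ⟨h1, h2, h3, h4⟩
  · rintro ⟨h1, h2, h3, h4⟩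
    rw [pvRow_eq_getD g h1, pvRect_rowlen g hrect (by omega)]
    exact ⟨h1, h2, h3, h4⟩

def pvNxtI (w c : Int) : Int := if c + 1 = w then 0 else c + 1
def pvPrvI (w c : Int) : Int := if c = 0 then w - 1 else c - 1

theorem pvNxtI_bounds {w c : Int} (h0 : 0 ≤ c) (h1 : c < w) : 0 ≤ pvNxtI w c ∧ pvNxtI w c < w := by
  unfold pvNxtI; split <;> omega
theorem pvPrvI_bounds {w c : Int} (h0 : 0 ≤ c) (h1 : c < w) : 0 ≤ pvPrvI w c ∧ pvPrvI w c < w := by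
  unfold pvPrvI; split <;> omega
theorem pvPrvI_nxtI {w c : Int} (h0 : 0 ≤ c) (h1 : c < w) : pvPrvI w (pvNxtI w c) = c := by
  unfold pvPrvI pvNxtI; split_ifs <;> omega
theorem pvNxtI_prvI {w c : Int} (h0 : 0 ≤ c) (h1 : c < w) : pvNxtI w (pvPrvI w c) = c := by
  unfold pvPrvI pvNxtI; split_ifs <;> omega

-- ---------- port A's east pass, cell-wise ----------
def pvEastValA (g : List String) (d : PySem.Dict (Int × Int) Char) (r c : Int) : Char :=
  if d.getD (r, c) ' ' = '>' ∧ ¬ d.getD (r, pvNxtI (pvRowLen g 0) c) ' ' = '.' then '>'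
  else if d.getD (r, c) ' ' = '.' ∧ d.getD (r, pvPrvI (pvRowLen g 0) c) ' ' = '>' then '>'
  else if d.getD (r, c) ' ' = 'v' then 'v' else '.'

def pvEastW (g : List String) (d : PySem.Dict (Int × Int) Char) (rc : Int × Int) :
    Option ((Int × Int) × Char) :=
  if d.getD rc ' ' = '>' then
    some (if d.getD (rc.1, pvNxtI (pvRowLen g 0) rc.2) ' ' = '.'
          then ((rc.1, pvNxtI (pvRowLen g 0) rc.2), '>') else (rc, '>'))
  else if d.getD rc ' ' = 'v' then some (rc, 'v') else none

theorem pvEast_eq_build (g : List String) (hrect : pvRect g = true)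
    (d : PySem.Dict (Int × Int) Char) :
    pvEast g d = pvBuild g (fun r c => pvEastValA g d r c) := by
  have hW0 : ((pvW g : Nat) : Int) = pvRowLen g 0 := (pvRowLen_zero g).symm
  have hbody : (fun (nd : PySem.Dict (Int × Int) Char) (rc : Int × Int) =>
      if d.getD (rc.1, rc.2) ' ' = '>' then
        let nextC : Int := if rc.2 + 1 = pvRowLen g 0 then 0 else rc.2 + 1
        if d.getD (rc.1, nextC) ' ' = '.' then nd.insert (rc.1, nextC) '>' else nd.insert (rc.1, rc.2) '>'
      else if d.getD (rc.1, rc.2) ' ' = 'v' then nd.insert (rc.1, rc.2) 'v'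
      else nd)
      = (fun nd rc => match pvEastW g d rc with | some tv => nd.insert tv.1 tv.2 | none => nd) := by
    funext nd rc
    simp only [pvEastW, pvNxtI]
    split_ifs <;> rfl
  rw [pvEast_eq_foldl, hbody]
  have hcons : ∀ x ∈ pvCellsL g, ∀ t v, pvEastW g d x = some (t, v) →
      t ∈ pvCellsL g ∧ v = pvEastValA g d t.1 t.2 := by
    intro x hx t v hW
    obtain ⟨r, c⟩ := x
    rw [mem_cells_rect g hrect] at hx
    obtain ⟨h1, h2, h3, h4⟩ := hx
    rw [hW0] at h4
    simp only [pvEastW] at hW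
    split_ifs at hW with hgt hfree hv
    · -- '>' free: writes at (r, nxt c)
      simp only [Option.some.injEq, Prod.mk.injEq] at hW
      obtain ⟨ht, hv'⟩ := hW
      subst ht; subst hv'
      refine ⟨(mem_cells_rect g hrect _ _).mpr
        ⟨h1, h2, by rw [← hW0] at h4 ⊢; exact ⟨(pvNxtI_bounds h3 h4).1, (pvNxtI_bounds h3 h4).2⟩⟩, ?_⟩
      unfold pvEastValA
      rw [if_neg (by rw [hfree]; rintro ⟨h, -⟩; exact absurd h (by decide))]
      rw [if_pos ⟨hfree, by rw [← hW0] at h4; rw [← hW0, pvPrvI_nxtI h3 h4, hW0]; exact hgt⟩]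
    · simp only [Option.some.injEq, Prod.mk.injEq] at hW
      obtain ⟨ht, hv'⟩ := hW
      subst ht; subst hv'
      refine ⟨(mem_cells_rect g hrect _ _).mpr ⟨h1, h2, h3, by rw [← hW0] at h4; omega⟩, ?_⟩
      unfold pvEastValA
      rw [if_pos ⟨hgt, hfree⟩]
    · simp only [Option.some.injEq, Prod.mk.injEq] at hW
      obtain ⟨ht, hv'⟩ := hW
      subst ht; subst hv'
      refine ⟨(mem_cells_rect g hrect _ _).mpr ⟨h1, h2, h3, by rw [← hW0] at h4; omega⟩, ?_⟩
      unfold pvEastValA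
      rw [if_neg (by rw [hv]; rintro ⟨h, -⟩; exact absurd h (by decide))]
      rw [if_neg (by rw [hv]; rintro ⟨h, -⟩; exact absurd h (by decide))]
      rw [if_pos hv]
  have hitems := pv_items_condInsertW (pvCellsL g) (pvEastW g d)
    (fun rc => pvEastValA g d rc.1 rc.2) (pvCellsL g) (fun _ => '.')
    (pvBuild g (fun _ _ => '.')) (items_pvBuild g _) hcons
  apply PySem.Dict.ext
  rw [hitems, items_pvBuild]
  refine List.map_congr_left (fun k hk => ?_)
  by_cases hc : ((pvCellsL g).filterMap (fun x => (pvEastW g d x).map Prod.fst)).contains k = true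
  · rw [if_pos hc]
  · rw [if_neg hc]
    obtain ⟨r, c⟩ := k
    obtain ⟨h1, h2, h3, h4⟩ := (mem_cells_rect g hrect r c).mp hk
    have hgoal : pvEastValA g d r c = '.' := by
      unfold pvEastValA
      split_ifs with A B C
      · exfalso; apply hc
        refine List.contains_iff_mem.mpr (List.mem_filterMap.mpr ⟨(r, c), hk, ?_⟩)
        simp [pvEastW, A.1, A.2]
      · exfalso; apply hc
        have hprvmem : (r, pvPrvI (pvRowLen g 0) c) ∈ pvCellsL g := by
          refine (mem_cells_rect g hrect _ _).mpr ⟨h1, h2, ?_⟩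
          rw [← hW0]
          exact ⟨(pvPrvI_bounds h3 (hW0 ▸ h4)).1, (pvPrvI_bounds h3 (hW0 ▸ h4)).2⟩
        refine List.contains_iff_mem.mpr (List.mem_filterMap.mpr ⟨(r, pvPrvI (pvRowLen g 0) c), hprvmem, ?_⟩)
        have e : pvNxtI (pvRowLen g 0) (pvPrvI (pvRowLen g 0) c) = c := by
          rw [← hW0]
          exact pvNxtI_prvI h3 (hW0 ▸ h4)
        simp [pvEastW, B.2, e, B.1]
      · exfalso; apply hc
        refine List.contains_iff_mem.mpr (List.mem_filterMap.mpr ⟨(r, c), hk, ?_⟩)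
        simp [pvEastW, C]
      · rfl
    rw [hgoal]

-- ---------- port A's south pass, cell-wise ----------
def pvSouthValA (g : List String) (s2 : PySem.Dict (Int × Int) Char) (r c : Int) : Char :=
  if s2.getD (r, c) ' ' = 'v' ∧ ¬ s2.getD (pvNxtI (g.length : Int) r, c) ' ' = '.' then 'v'
  else if s2.getD (r, c) ' ' = '.' ∧ s2.getD (pvPrvI (g.length : Int) r, c) ' ' = 'v' then 'v'
  else if s2.getD (r, c) ' ' = '>' then '>' else '.'

def pvSouthW (g : List String) (s2 : PySem.Dict (Int × Int) Char) (rc : Int × Int) :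
    Option ((Int × Int) × Char) :=
  if s2.getD rc ' ' = 'v' then
    some (if s2.getD (pvNxtI (g.length : Int) rc.1, rc.2) ' ' = '.'
          then ((pvNxtI (g.length : Int) rc.1, rc.2), 'v') else (rc, 'v'))
  else if s2.getD rc ' ' = '>' then some (rc, '>') else none

theorem pvSouth_eq_build (g : List String) (hrect : pvRect g = true)
    (s2 : PySem.Dict (Int × Int) Char) :
    pvSouth g s2 = pvBuild g (fun r c => pvSouthValA g s2 r c) := by
  have hbody : (fun (nd : PySem.Dict (Int × Int) Char) (rc : Int × Int) =>
      if s2.getD (rc.1, rc.2) ' ' = 'v' then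
        let nextR : Int := if rc.1 + 1 = (g.length : Int) then 0 else rc.1 + 1
        if s2.getD (nextR, rc.2) ' ' = '.' then nd.insert (nextR, rc.2) 'v' else nd.insert (rc.1, rc.2) 'v'
      else if s2.getD (rc.1, rc.2) ' ' = '>' then nd.insert (rc.1, rc.2) '>'
      else nd)
      = (fun nd rc => match pvSouthW g s2 rc with | some tv => nd.insert tv.1 tv.2 | none => nd) := by
    funext nd rc
    simp only [pvSouthW, pvNxtI]
    split_ifs <;> rfl
  rw [pvSouth_eq_foldl, hbody]
  have hcons : ∀ x ∈ pvCellsL g, ∀ t v, pvSouthW g s2 x = some (t, v) →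
      t ∈ pvCellsL g ∧ v = pvSouthValA g s2 t.1 t.2 := by
    intro x hx t v hW
    obtain ⟨r, c⟩ := x
    rw [mem_cells_rect g hrect] at hx
    obtain ⟨h1, h2, h3, h4⟩ := hx
    simp only [pvSouthW] at hW
    split_ifs at hW with hv hfree hgt
    · simp only [Option.some.injEq, Prod.mk.injEq] at hW
      obtain ⟨ht, hv'⟩ := hW
      subst ht; subst hv'
      refine ⟨(mem_cells_rect g hrect _ _).mpr
        ⟨(pvNxtI_bounds h1 h2).1, (pvNxtI_bounds h1 h2).2, h3, h4⟩, ?_⟩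
      unfold pvSouthValA
      rw [if_neg (by rw [hfree]; rintro ⟨h, -⟩; exact absurd h (by decide))]
      rw [if_pos ⟨hfree, by rw [pvPrvI_nxtI h1 h2]; exact hv⟩]
    · simp only [Option.some.injEq, Prod.mk.injEq] at hW
      obtain ⟨ht, hv'⟩ := hW
      subst ht; subst hv'
      refine ⟨(mem_cells_rect g hrect _ _).mpr ⟨h1, h2, h3, h4⟩, ?_⟩
      unfold pvSouthValA
      rw [if_pos ⟨hv, hfree⟩]
    · simp only [Option.some.injEq, Prod.mk.injEq] at hW
      obtain ⟨ht, hv'⟩ := hW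
      subst ht; subst hv'
      refine ⟨(mem_cells_rect g hrect _ _).mpr ⟨h1, h2, h3, h4⟩, ?_⟩
      unfold pvSouthValA
      rw [if_neg (by rw [hgt]; rintro ⟨h, -⟩; exact absurd h (by decide))]
      rw [if_neg (by rw [hgt]; rintro ⟨h, -⟩; exact absurd h (by decide))]
      rw [if_pos hgt]
  have hitems := pv_items_condInsertW (pvCellsL g) (pvSouthW g s2)
    (fun rc => pvSouthValA g s2 rc.1 rc.2) (pvCellsL g) (fun _ => '.')
    (pvBuild g (fun _ _ => '.')) (items_pvBuild g _) hcons
  apply PySem.Dict.ext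
  rw [hitems, items_pvBuild]
  refine List.map_congr_left (fun k hk => ?_)
  by_cases hc : ((pvCellsL g).filterMap (fun x => (pvSouthW g s2 x).map Prod.fst)).contains k = true
  · rw [if_pos hc]
  · rw [if_neg hc]
    obtain ⟨r, c⟩ := k
    obtain ⟨h1, h2, h3, h4⟩ := (mem_cells_rect g hrect r c).mp hk
    have hgoal : pvSouthValA g s2 r c = '.' := by
      unfold pvSouthValA
      split_ifs with A B C
      · exfalso; apply hc
        refine List.contains_iff_mem.mpr (List.mem_filterMap.mpr ⟨(r, c), hk, ?_⟩)
        simp [pvSouthW, A.1, A.2]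
      · exfalso; apply hc
        have hprvmem : (pvPrvI (g.length : Int) r, c) ∈ pvCellsL g :=
          (mem_cells_rect g hrect _ _).mpr
            ⟨(pvPrvI_bounds h1 h2).1, (pvPrvI_bounds h1 h2).2, h3, h4⟩
        refine List.contains_iff_mem.mpr (List.mem_filterMap.mpr ⟨(pvPrvI (g.length : Int) r, c), hprvmem, ?_⟩)
        have e : pvNxtI (g.length : Int) (pvPrvI (g.length : Int) r) = r := pvNxtI_prvI h1 h2
        simp [pvSouthW, B.2, e, B.1]
      · exfalso; apply hc
        refine List.contains_iff_mem.mpr (List.mem_filterMap.mpr ⟨(r, c), hk, ?_⟩)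
        simp [pvSouthW, C]
      · rfl
    rw [hgoal]

-- ---------- bridge between A's dict state and B's grid state ----------
def pvGVal (G : List (List Char)) (r c : Int) : Char := (G.getD r.toNat []).getD c.toNat ' '

def pvDictOf (g : List String) (G : List (List Char)) : PySem.Dict (Int × Int) Char :=
  pvBuild g (fun r c => pvGVal G r c)

def pvSh (g : List String) (G : List (List Char)) : Prop :=
  G.length = g.length ∧ ∀ row ∈ G, row.length = pvW g

theorem pvRowsGetD (g : List String) (i : Nat) :
    (g.map (·.toList)).getD i [] = (g.getD i "").toList := by
  by_cases h : i < g.length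
  · rw [List.getD_eq_getElem _ _ (by simpa using h), List.getD_eq_getElem _ _ h, List.getElem_map]
  · rw [List.getD_eq_default _ _ (by simpa using Nat.le_of_not_lt h),
      List.getD_eq_default _ _ (Nat.le_of_not_lt h)]
    simp

theorem pvInit_eq (g : List String) :
    pvBuild g (fun r c => pvCellC g r c) = pvDictOf g (g.map (·.toList)) := by
  unfold pvDictOf
  rw [pvBuild_eq_iff]
  intro rc hrc
  obtain ⟨r, c⟩ := rc
  obtain ⟨h1, _, h3, _⟩ := (mem_pvCellsL' g r c).mp hrc
  rw [pvCellC, pvRow_eq_getD g h1, pvGVal, pvRowsGetD]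
  rw [show c = ((c.toNat : Nat) : Int) from by omega, PySem.List.pyGetD_natCast]
  simp [max_eq_left h3]

theorem pvSh_init (g : List String) (hrect : pvRect g = true) : pvSh g (g.map (·.toList)) := by
  refine ⟨by simp, fun row hrow => ?_⟩
  simp only [List.mem_map] at hrow
  obtain ⟨s, hs, rfl⟩ := hrow
  simp only [pvRect, List.all_eq_true] at hrect
  simpa [pvW] using hrect s hs

theorem getD_dictOf (g : List String) (G : List (List Char)) {rc : Int × Int}
    (h : rc ∈ pvCellsL g) : (pvDictOf g G).getD rc ' ' = pvGVal G rc.1 rc.2 := by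
  unfold pvDictOf
  obtain ⟨r, c⟩ := rc
  exact getD_pvBuild g _ h ' '

theorem pvNxtI_toNat {w : Nat} {c : Int} (h0 : 0 ≤ c) (h1 : c < (w : Int)) :
    (pvNxtI (w : Int) c).toNat = pvNxt w c.toNat := by
  unfold pvNxtI pvNxt; split_ifs <;> omega
theorem pvPrvI_toNat {w : Nat} {c : Int} (h0 : 0 ≤ c) (h1 : c < (w : Int)) :
    (pvPrvI (w : Int) c).toNat = pvPrv w c.toNat := by
  unfold pvPrvI pvPrv; split_ifs <;> omega

-- getD through range-map and map
theorem pvGetD_range_map {α : Type} (n i : Nat) (f : Nat → α) (dflt : α) (h : i < n) :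
    ((List.range n).map f).getD i dflt = f i := by
  rw [List.getD_eq_getElem _ _ (by simpa using h)]
  simp

theorem pvGetD_map (l : List (List Char)) (f : List Char → Char) (i : Nat) (dflt : Char)
    (h : i < l.length) : (l.map f).getD i dflt = f (l.getD i []) := by
  rw [List.getD_eq_getElem _ _ (by simpa using h), List.getElem_map,
    List.getD_eq_getElem _ _ h]

theorem pvClean_length (row : List Char) : (pvClean row).length = row.length := by
  simp [pvClean]

theorem pvClean_getD (row : List Char) (j : Nat) (h : j < row.length) :
    (pvClean row).getD j ' ' = (fun c => if c = '>' || c = 'v' then c else '.') (row.getD j ' ') := by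
  unfold pvClean
  rw [List.getD_eq_getElem _ _ (by simpa using h), List.getElem_map,
    List.getD_eq_getElem _ _ h]

-- B's east result for one row, cell-wise (already cleaned)
def pvRowsB (G : List (List Char)) : List (List Char) :=
  G.map (fun row => pvClean (pvSlide '>' row))
def pvColB (G : List (List Char)) (j : Nat) : List Char :=
  (pvRowsB G).map (fun row => row.getD j ' ')

theorem pvRowsB_length (G : List (List Char)) : (pvRowsB G).length = G.length := by
  simp [pvRowsB]
theorem pvRowsB_row_length (G : List (List Char)) (i : Nat) (h : i < G.length) :
    ((pvRowsB G).getD i []).length = (G.getD i []).length := by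
  unfold pvRowsB
  rw [List.getD_eq_getElem _ _ (by simpa using h), List.getElem_map,
    pvClean_length, pvSlide_length, List.getD_eq_getElem _ _ h]

theorem pvRowsB_getD (G : List (List Char)) (i j : Nat) (hi : i < G.length)
    (hj : j < (G.getD i []).length) :
    ((pvRowsB G).getD i []).getD j ' '
      = (fun c => if c = '>' || c = 'v' then c else '.') (pvSlideCell '>' (G.getD i []) j) := by
  have e : (pvRowsB G).getD i [] = pvClean (pvSlide '>' (G.getD i [])) := by
    unfold pvRowsB
    rw [List.getD_eq_getElem _ _ (by simpa using hi), List.getElem_map,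
      List.getD_eq_getElem _ _ hi]
  rw [e, pvClean_getD _ _ (by rw [pvSlide_length]; exact hj), pvSlide_getD '>' (by decide) _ _ hj]

theorem pvHeadD_eq_getD' (l : List (List Char)) : l.headD [] = l.getD 0 [] := by
  cases l <;> rfl

theorem pvStepB_def (G : List (List Char)) : pvStepB G =
    (List.range (pvRowsB G).length).map (fun r =>
      (List.range ((pvRowsB G).headD []).length).map (fun c =>
        (((List.range ((pvRowsB G).headD []).length).map
            (fun cc => pvSlide 'v' (pvColB G cc))).getD c []).getD r ' ')) := rfl

theorem pvColB_length (G : List (List Char)) (j : Nat) : (pvColB G j).length = G.length := by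
  simp [pvColB, pvRowsB_length]

theorem pvColB_getD (G : List (List Char)) (j i : Nat) (hi : i < G.length) :
    (pvColB G j).getD i ' ' = ((pvRowsB G).getD i []).getD j ' ' := by
  unfold pvColB
  exact pvGetD_map _ _ _ _ (by rwa [pvRowsB_length])

theorem pvWidthB (g : List String) (G : List (List Char)) (hSh : pvSh g G) (hm : 0 < G.length) :
    ((pvRowsB G).headD []).length = pvW g := by
  rw [pvHeadD_eq_getD', pvRowsB_row_length G 0 hm]
  exact hSh.2 (G.getD 0 []) (by rw [List.getD_eq_getElem _ _ hm]; exact List.getElem_mem _)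

theorem pvStepB_getD (g : List String) (G : List (List Char)) (hSh : pvSh g G)
    (i j : Nat) (hi : i < G.length) (hj : j < pvW g) :
    ((pvStepB G).getD i []).getD j ' ' = pvSlideCell 'v' (pvColB G j) i := by
  have hm : 0 < G.length := by omega
  have hwidth := pvWidthB g G hSh hm
  rw [pvStepB_def]
  rw [pvGetD_range_map _ i _ _ (by rwa [pvRowsB_length])]
  rw [pvGetD_range_map _ j _ _ (by rwa [hwidth])]
  rw [pvGetD_range_map _ j _ _ (by rwa [hwidth])]
  exact pvSlide_getD 'v' (by decide) _ i (by rwa [pvColB_length])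

theorem pvSh_stepB (g : List String) (G : List (List Char)) (hSh : pvSh g G) :
    pvSh g (pvStepB G) := by
  constructor
  · rw [pvStepB_def]
    simp [pvRowsB_length, hSh.1]
  · intro row hrow
    rw [pvStepB_def] at hrow
    simp only [List.mem_map, List.mem_range] at hrow
    obtain ⟨r, hr, rfl⟩ := hrow
    rw [pvRowsB_length] at hr
    have hm : 0 < G.length := by omega
    simpa using pvWidthB g G hSh hm

-- the east/south cell formulas coincide with B's slide/clean cell values
theorem pvEastCell_cases (row : List Char) (j : Nat) :
    (if row.getD j ' ' = '>' ∧ ¬ row.getD (pvNxt row.length j) ' ' = '.' then '>'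
     else if row.getD j ' ' = '.' ∧ row.getD (pvPrv row.length j) ' ' = '>' then '>'
     else if row.getD j ' ' = 'v' then 'v' else '.')
    = (fun c => if c = '>' || c = 'v' then c else '.') (pvSlideCell '>' row j) := by
  unfold pvSlideCell
  split_ifs <;> simp_all

theorem pvSouthCell_cases (col : List Char) (i : Nat)
    (hx : col.getD i ' ' = '.' ∨ col.getD i ' ' = '>' ∨ col.getD i ' ' = 'v') :
    (if col.getD i ' ' = 'v' ∧ ¬ col.getD (pvNxt col.length i) ' ' = '.' then 'v'
     else if col.getD i ' ' = '.' ∧ col.getD (pvPrv col.length i) ' ' = 'v' then 'v'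
     else if col.getD i ' ' = '>' then '>' else '.')
    = pvSlideCell 'v' col i := by
  unfold pvSlideCell
  split_ifs <;> first | rfl | (rcases hx with h | h | h <;> simp_all)

theorem pvRowsB_clean (G : List (List Char)) (i j : Nat) (hi : i < G.length)
    (hj : j < (G.getD i []).length) :
    ((pvRowsB G).getD i []).getD j ' ' = '.' ∨ ((pvRowsB G).getD i []).getD j ' ' = '>'
      ∨ ((pvRowsB G).getD i []).getD j ' ' = 'v' := by
  rw [pvRowsB_getD G i j hi hj]
  set a := pvSlideCell '>' (G.getD i []) j
  by_cases h : (a = '>' || a = 'v') = true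
  · rcases Bool.or_eq_true_iff.mp h with h' | h'
    · right; left; simp [decide_eq_true_iff.mp h']
    · right; right; simp [decide_eq_true_iff.mp h']
  · left; simp [h]

theorem pvEastValA_dictOf (g : List String) (hrect : pvRect g = true) (G : List (List Char))
    (hSh : pvSh g G) {r c : Int} (hrc : (r, c) ∈ pvCellsL g) :
    pvEastValA g (pvDictOf g G) r c = ((pvRowsB G).getD r.toNat []).getD c.toNat ' ' := by
  obtain ⟨h1, h2, h3, h4⟩ := (mem_cells_rect g hrect r c).mp hrc
  have hGl := hSh.1
  have hw0 : pvRowLen g 0 = ((pvW g : Nat) : Int) := pvRowLen_zero g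
  have hiG : r.toNat < G.length := by omega
  have hrow_mem : G.getD r.toNat [] ∈ G := by
    rw [List.getD_eq_getElem _ _ hiG]; exact List.getElem_mem _
  have hrowlen : (G.getD r.toNat []).length = pvW g := hSh.2 _ hrow_mem
  have hjG : c.toNat < (G.getD r.toNat []).length := by rw [hrowlen]; omega
  have hnx_mem : (r, pvNxtI (pvRowLen g 0) c) ∈ pvCellsL g := by
    rw [hw0]
    exact (mem_cells_rect g hrect _ _).mpr ⟨h1, h2, (pvNxtI_bounds h3 h4).1, (pvNxtI_bounds h3 h4).2⟩
  have hpv_mem : (r, pvPrvI (pvRowLen g 0) c) ∈ pvCellsL g := by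
    rw [hw0]
    exact (mem_cells_rect g hrect _ _).mpr ⟨h1, h2, (pvPrvI_bounds h3 h4).1, (pvPrvI_bounds h3 h4).2⟩
  unfold pvEastValA
  rw [getD_dictOf g G hrc, getD_dictOf g G hnx_mem, getD_dictOf g G hpv_mem]
  unfold pvGVal
  simp only [hw0]
  rw [pvNxtI_toNat h3 h4, pvPrvI_toNat h3 h4]
  rw [pvRowsB_getD G r.toNat c.toNat hiG hjG]
  rw [show pvNxt (pvW g) c.toNat = pvNxt (G.getD r.toNat []).length c.toNat from by rw [hrowlen],
      show pvPrv (pvW g) c.toNat = pvPrv (G.getD r.toNat []).length c.toNat from by rw [hrowlen]]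
  exact pvEastCell_cases (G.getD r.toNat []) c.toNat

theorem pvStep_eq (g : List String) (hrect : pvRect g = true) (G : List (List Char))
    (hSh : pvSh g G) :
    pvSouth g (pvEast g (pvDictOf g G)) = pvDictOf g (pvStepB G) := by
  rw [pvEast_eq_build g hrect, pvSouth_eq_build g hrect]
  show _ = pvBuild g (fun r c => pvGVal (pvStepB G) r c)
  rw [pvBuild_eq_iff]
  intro rc hrc
  obtain ⟨r, c⟩ := rc
  obtain ⟨h1, h2, h3, h4⟩ := (mem_cells_rect g hrect r c).mp hrc
  have hGl := hSh.1
  have hiG : r.toNat < G.length := by omega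
  have hjW : c.toNat < pvW g := by omega
  have hrow_mem : G.getD r.toNat [] ∈ G := by
    rw [List.getD_eq_getElem _ _ hiG]; exact List.getElem_mem _
  have hrowlen : (G.getD r.toNat []).length = pvW g := hSh.2 _ hrow_mem
  have hnR_mem : (pvNxtI (g.length : Int) r, c) ∈ pvCellsL g :=
    (mem_cells_rect g hrect _ _).mpr ⟨(pvNxtI_bounds h1 h2).1, (pvNxtI_bounds h1 h2).2, h3, h4⟩
  have hpR_mem : (pvPrvI (g.length : Int) r, c) ∈ pvCellsL g :=
    (mem_cells_rect g hrect _ _).mpr ⟨(pvPrvI_bounds h1 h2).1, (pvPrvI_bounds h1 h2).2, h3, h4⟩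
  unfold pvSouthValA
  rw [getD_pvBuild g _ hrc ' ', getD_pvBuild g _ hnR_mem ' ', getD_pvBuild g _ hpR_mem ' ']
  dsimp only
  rw [pvEastValA_dictOf g hrect G hSh hrc,
      pvEastValA_dictOf g hrect G hSh hnR_mem,
      pvEastValA_dictOf g hrect G hSh hpR_mem]
  have hnb := pvNxtI_bounds h1 h2
  have hpb := pvPrvI_bounds h1 h2
  rw [← pvColB_getD G c.toNat r.toNat hiG,
      ← pvColB_getD G c.toNat (pvNxtI (g.length : Int) r).toNat (by omega),
      ← pvColB_getD G c.toNat (pvPrvI (g.length : Int) r).toNat (by omega)]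
  rw [pvNxtI_toNat h1 h2, pvPrvI_toNat h1 h2]
  -- right-hand side: B's step
  show _ = ((pvStepB G).getD r.toNat []).getD c.toNat ' '
  rw [pvStepB_getD g G hSh r.toNat c.toNat hiG hjW]
  have hlen : g.length = (pvColB G c.toNat).length := by rw [pvColB_length]; omega
  rw [show pvNxt g.length r.toNat = pvNxt (pvColB G c.toNat).length r.toNat from by rw [← hlen],
      show pvPrv g.length r.toNat = pvPrv (pvColB G c.toNat).length r.toNat from by rw [← hlen]]
  refine pvSouthCell_cases (pvColB G c.toNat) r.toNat ?_
  rw [pvColB_getD G c.toNat r.toNat hiG]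
  exact pvRowsB_clean G r.toNat c.toNat hiG (by rw [hrowlen]; omega)

theorem pvDictOf_inj (g : List String) (hrect : pvRect g = true) (G G' : List (List Char))
    (hSh : pvSh g G) (hSh' : pvSh g G') (h : pvDictOf g G = pvDictOf g G') : G = G' := by
  unfold pvDictOf at h
  rw [pvBuild_eq_iff] at h
  have hlen : G.length = G'.length := by rw [hSh.1, hSh'.1]
  apply List.ext_getElem hlen
  intro i hi hi'
  have hrl : G[i].length = pvW g := hSh.2 _ (List.getElem_mem _)
  have hrl' : G'[i].length = pvW g := hSh'.2 _ (List.getElem_mem _)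
  apply List.ext_getElem (by rw [hrl, hrl'])
  intro j hj hj'
  have hcell : (((i : Nat) : Int), ((j : Nat) : Int)) ∈ pvCellsL g := by
    refine (mem_cells_rect g hrect _ _).mpr ⟨by positivity, ?_, by positivity, ?_⟩
    · have : i < g.length := by rw [← hSh.1]; exact hi
      exact_mod_cast this
    · have : j < pvW g := by rw [← hrl]; exact hj
      exact_mod_cast this
  have hv := h _ hcell
  unfold pvGVal at hv
  simp only [Int.toNat_natCast] at hv
  rw [List.getD_eq_getElem _ _ hi, List.getD_eq_getElem _ _ hi'] at hv
  rw [List.getD_eq_getElem _ _ hj, List.getD_eq_getElem _ _ hj'] at hv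
  exact hv

theorem pvLoop_eq (g : List String) (hrect : pvRect g = true) :
    ∀ (fuel : Nat) (G : List (List Char)) (i : Int), pvSh g G →
      pvALoop g fuel (pvDictOf g G) i = pvBLoop fuel G i := by
  intro fuel
  induction fuel with
  | zero => intro G i _; rfl
  | succ n ih =>
    intro G i hSh
    simp only [pvALoop, pvBLoop]
    rw [pvStep_eq g hrect G hSh]
    by_cases hEq : pvStepB G = G
    · rw [hEq]; simp
    · have hne : pvDictOf g (pvStepB G) ≠ pvDictOf g G := fun hc =>
        hEq (pvDictOf_inj g hrect _ _ (pvSh_stepB g G hSh) hSh hc)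
      rw [if_neg hne, if_neg hEq]
      exact ih (pvStepB G) (i + 1) (pvSh_stepB g G hSh)

-- ===== VERDICT (by name: the statement is the Claim_ definition above) =====
theorem findLandingSpace_spec : Claim_equal_findLandingSpace := by
  intro g _ hpre
  show findLandingSpace g = findLandingSpace_alt g
  rw [findLandingSpace, findLandingSpace_alt, pvInit_eq g]
  generalize pvFuel g = f
  exact pvLoop_eq g hpre f (g.map (·.toList)) 1 (pvSh_init g hpre)
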